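-- pv_equiv track=rewrite | github.com/msg430/Project-Euler | problem275.py | sideCheck
-- ===== SOURCE A (Python) =====
-- def sideCheck(side, centre):
--     needToClear = []
--     good = []
--     for block in side:
--         if block in centre:
--             good.append(block)
--         else:
--             needToClear.append(block)
--     caught = True
--     while caught:
--         caught = False
--         for need in needToClear:
--             if (need + 1 in good) or (need - 1 in good):
--                 good.append(need)
--                 caught = True
--                 needToClear.remove(need)
--                 break
--     if len(needToClear) > 0:
--         return False
--     return True
-- ===== SOURCE B (Python) =====
-- def sideCheck(side, centre):
--     pending = set(side) - set(centre)
--     queue = list(set(side) & set(centre))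
--     while queue:
--         x = queue.pop()
--         for y in (x + 1, x - 1):
--             if y in pending:
--                 pending.discard(y)
--                 queue.append(y)
--     return not pending
-- ===== Notes on version B (the rewrite author's own statement) =====
-- stated objective: faster
-- what changed: A repeatedly rescans the whole uncleared list (restarting after every single move) with linear membership tests; B does a single set-based flood fill from the centre blocks, popping each reachable block once from a worklist and probing its two +-1 neighbours in a hash set.
import Mathlib
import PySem

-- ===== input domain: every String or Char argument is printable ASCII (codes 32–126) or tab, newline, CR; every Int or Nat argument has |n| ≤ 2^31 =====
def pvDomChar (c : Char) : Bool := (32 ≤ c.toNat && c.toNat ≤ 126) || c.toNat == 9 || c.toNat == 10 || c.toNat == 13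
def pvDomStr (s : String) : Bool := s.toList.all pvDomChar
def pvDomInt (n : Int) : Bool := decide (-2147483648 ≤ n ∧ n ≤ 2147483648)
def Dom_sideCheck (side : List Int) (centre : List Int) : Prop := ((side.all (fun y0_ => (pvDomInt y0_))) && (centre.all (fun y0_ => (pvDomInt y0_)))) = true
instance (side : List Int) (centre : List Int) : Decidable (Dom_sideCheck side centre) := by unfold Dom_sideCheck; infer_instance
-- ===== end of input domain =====

-- B replaces A's restart-after-every-move rescans of the uncleared list by a single
-- set-based flood fill from the centre blocks (objective: faster, asymptotic).

-- ===== PORT A =====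
-- the inner 'for need in needToClear: if … break' loop: first need adjacent to good
def pvFindAdj (good : List Int) : List Int → Option Int
  | [] => none
  | n :: rest => if (n + 1) ∈ good ∨ (n - 1) ∈ good then some n else pvFindAdj good rest

-- the 'while caught' loop; fuel = needToClear.length suffices (each caught pass removes one element).
-- 'needToClear.remove(need)' = ntc.erase n, exact here since n ∈ ntc (PySem.List.remove?_eq_some_erase)
def pvLoopA : Nat → List Int → List Int → List Int × List Int
  | 0, good, ntc => (good, ntc)
  | f + 1, good, ntc =>
    match pvFindAdj good ntc with
    | none => (good, ntc)
    | some n => pvLoopA f (good ++ [n]) (ntc.erase n)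

def sideCheck (side : List Int) (centre : List Int) : Bool :=
  -- the first for-loop, appending each block to good or needToClear
  let p := side.foldl
    (fun (acc : List Int × List Int) block =>
      if block ∈ centre then (acc.1 ++ [block], acc.2) else (acc.1, acc.2 ++ [block]))
    ([], [])
  let r := pvLoopA p.2.length p.1 p.2
  if r.2.length > 0 then false else true

-- ===== PORT B =====
-- the 'while queue' loop; queue.pop() takes the last element; fuel = |queue| + 2*|pending|
-- strictly dominates the measure, which drops by ≥ 1 per iteration, so it never runs out.
def pvLoopB : Nat → List Int → List Int → List Int
  | 0, pending, _ => pending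
  | f + 1, pending, queue =>
    match queue.getLast? with
    | none => pending
    | some x =>
      let q0 := queue.dropLast
      let s1 := if (x + 1) ∈ pending then (PySem.Set.discard pending (x + 1), q0 ++ [x + 1]) else (pending, q0)
      let s2 := if (x - 1) ∈ s1.1 then (PySem.Set.discard s1.1 (x - 1), s1.2 ++ [x - 1]) else s1
      pvLoopB f s2.1 s2.2

def sideCheck_alt (side : List Int) (centre : List Int) : Bool :=
  let pending := PySem.Set.diff (PySem.Set.ofList side) (PySem.Set.ofList centre)
  let queue := PySem.Set.inter (PySem.Set.ofList side) (PySem.Set.ofList centre)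
  let final := pvLoopB (queue.length + 2 * pending.length) pending queue
  final.isEmpty

-- ===== PRECONDITION & SPEC =====
def Spec_sideCheck (side : List Int) (centre : List Int) (out : Bool) : Prop := out = sideCheck_alt side centre
instance (side : List Int) (centre : List Int) (out : Bool) : Decidable (Spec_sideCheck side centre out) := by unfold Spec_sideCheck; infer_instance

-- ===== CLAIM (what is proved, stated in full; the proofs are below) =====
def Claim_equal_sideCheck : Prop := ∀ (side : List Int) (centre : List Int), Dom_sideCheck side centre → Spec_sideCheck side centre (sideCheck side centre)

-- ===== LEMMAS AND PROOFS =====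

-- x is connected to a centre block through a ±1 chain of side blocks
inductive pvReach (side centre : List Int) : Int → Prop
  | base (x : Int) (hs : x ∈ side) (hc : x ∈ centre) : pvReach side centre x
  | step (x y : Int) (hy : pvReach side centre y) (hs : x ∈ side) (hadj : x = y + 1 ∨ x = y - 1) :
      pvReach side centre x

theorem pvReach_mem {side centre : List Int} {x : Int} (h : pvReach side centre x) : x ∈ side := by
  cases h with
  | base _ hs _ => exact hs
  | step _ _ _ hs _ => exact hs

-- ---------- side A ----------

def pvInvA (side centre good ntc : List Int) : Prop :=
  (∀ g ∈ good, pvReach side centre g) ∧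
  (∀ n ∈ ntc, n ∈ side ∧ n ∉ centre) ∧
  (∀ x ∈ side, x ∈ good ∨ x ∈ ntc)

theorem pvFindAdj_some {good : List Int} : ∀ {l : List Int} {n : Int},
    pvFindAdj good l = some n → n ∈ l ∧ ((n + 1) ∈ good ∨ (n - 1) ∈ good) := by
  intro l
  induction l with
  | nil => intro n h; simp [pvFindAdj] at h
  | cons a rest ih =>
    intro n h
    by_cases hc : (a + 1) ∈ good ∨ (a - 1) ∈ good
    · simp [pvFindAdj, hc] at h; subst h; exact ⟨List.mem_cons_self, hc⟩
    · simp [pvFindAdj, hc] at h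
      rcases ih h with ⟨h1, h2⟩
      exact ⟨List.mem_cons_of_mem _ h1, h2⟩

theorem pvFindAdj_none {good : List Int} : ∀ {l : List Int},
    pvFindAdj good l = none → ∀ n ∈ l, (n + 1) ∉ good ∧ (n - 1) ∉ good := by
  intro l
  induction l with
  | nil => intro _ n hn; simp at hn
  | cons a rest ih =>
    intro h n hn
    by_cases hc : (a + 1) ∈ good ∨ (a - 1) ∈ good
    · simp [pvFindAdj, hc] at h
    · simp [pvFindAdj, hc] at h
      rcases List.mem_cons.mp hn with rfl | hn'
      · exact ⟨fun h1 => hc (Or.inl h1), fun h2 => hc (Or.inr h2)⟩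
      · exact ih h n hn' 

theorem pvLoopA_inv {side centre : List Int} : ∀ (f : Nat) (good ntc : List Int),
    pvInvA side centre good ntc → pvInvA side centre (pvLoopA f good ntc).1 (pvLoopA f good ntc).2 := by
  intro f
  induction f with
  | zero => intro good ntc h; simpa [pvLoopA] using h
  | succ f ih =>
    intro good ntc h
    rcases h with ⟨h1, h2, h3⟩
    cases hfa : pvFindAdj good ntc with
    | none => simpa [pvLoopA, hfa] using ⟨h1, h2, h3⟩
    | some n =>
      rcases pvFindAdj_some hfa with ⟨hnm, hadj⟩
      simp only [pvLoopA, hfa]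
      apply ih
      refine ⟨?_, ?_, ?_⟩
      · intro g hg
        rcases List.mem_append.mp hg with hg' | hg'
        · exact h1 g hg'
        · rcases List.mem_singleton.mp hg' with rfl
          rcases hadj with hp | hp
          · exact pvReach.step g (g + 1) (h1 _ hp) (h2 g hnm).1 (Or.inr (by ring))
          · exact pvReach.step g (g - 1) (h1 _ hp) (h2 g hnm).1 (Or.inl (by ring))
      · intro m hm; exact h2 m (List.mem_of_mem_erase hm)
      · intro x hx
        rcases h3 x hx with hg | hn
        · exact Or.inl (List.mem_append.mpr (Or.inl hg))
        · by_cases hxn : x ∈ ntc.erase n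
          · exact Or.inr hxn
          · left
            apply List.mem_append.mpr; right
            apply List.mem_singleton.mpr
            by_contra hne
            exact hxn ((List.mem_erase_of_ne hne).mpr hn)

theorem pvLoopA_fix : ∀ (f : Nat) (good ntc : List Int), ntc.length ≤ f →
    pvFindAdj (pvLoopA f good ntc).1 (pvLoopA f good ntc).2 = none := by
  intro f
  induction f with
  | zero =>
    intro good ntc hlen
    have : ntc = [] := List.eq_nil_of_length_eq_zero (Nat.le_zero.mp hlen)
    subst this; simp [pvLoopA, pvFindAdj]
  | succ f ih =>
    intro good ntc hlen
    cases hfa : pvFindAdj good ntc with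
    | none => simp [pvLoopA, hfa]
    | some n =>
      rcases pvFindAdj_some hfa with ⟨hnm, _⟩
      simp only [pvLoopA, hfa]
      apply ih
      have := List.length_erase_of_mem hnm
      omega

-- at a fixpoint state, no reachable element is still uncleared
theorem pvFixA {side centre good ntc : List Int}
    (hinv : pvInvA side centre good ntc) (hfix : pvFindAdj good ntc = none) :
    ∀ x, pvReach side centre x → x ∉ ntc := by
  rcases hinv with ⟨h1, h2, h3⟩
  intro x hr
  induction hr with
  | base x hs hc => intro hx; exact (h2 x hx).2 hc
  | step x y hy hs hadj ihy =>
    intro hx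
    have hyg : y ∈ good := by
      rcases h3 y (pvReach_mem hy) with hg | hn
      · exact hg
      · exact absurd hn ihy
    have := pvFindAdj_none hfix x hx
    rcases hadj with rfl | rfl
    · exact this.2 (by simpa using hyg)
    · exact this.1 (by simpa using hyg)

theorem pvPartition (centre : List Int) : ∀ (l : List Int) (g n : List Int),
    l.foldl (fun (acc : List Int × List Int) block =>
      if block ∈ centre then (acc.1 ++ [block], acc.2) else (acc.1, acc.2 ++ [block])) (g, n)
    = (g ++ l.filter (fun b => decide (b ∈ centre)), n ++ l.filter (fun b => !decide (b ∈ centre))) := by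
  intro l
  induction l with
  | nil => intro g n; simp
  | cons a rest ih =>
    intro g n
    by_cases ha : a ∈ centre
    · simp [List.foldl_cons, ha, ih]
    · simp [List.foldl_cons, ha, ih]

theorem pvA_iff (side centre : List Int) :
    sideCheck side centre = true ↔ ∀ x ∈ side, pvReach side centre x := by
  unfold sideCheck
  rw [pvPartition]
  simp only [List.nil_append]
  set G0 := side.filter (fun b => decide (b ∈ centre)) with hG0
  set N0 := side.filter (fun b => !decide (b ∈ centre)) with hN0
  have hinv0 : pvInvA side centre G0 N0 := by
    refine ⟨?_, ?_, ?_⟩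
    · intro g hg
      rw [hG0, List.mem_filter] at hg
      exact pvReach.base g hg.1 (by simpa using hg.2)
    · intro m hm
      rw [hN0, List.mem_filter] at hm
      exact ⟨hm.1, by simpa using hm.2⟩
    · intro x hx
      by_cases hc : x ∈ centre
      · exact Or.inl (List.mem_filter.mpr ⟨hx, by simpa using hc⟩)
      · exact Or.inr (List.mem_filter.mpr ⟨hx, by simpa using hc⟩)
  have hinv := pvLoopA_inv (side := side) (centre := centre) N0.length G0 N0 hinv0
  have hfix := pvLoopA_fix N0.length G0 N0 (le_refl _)
  constructor
  · intro h x hx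
    have hlen : ¬ ((pvLoopA N0.length G0 N0).2.length > 0) := by
      intro hgt
      rw [if_pos hgt] at h
      exact Bool.false_ne_true h
    have hnil : (pvLoopA N0.length G0 N0).2 = [] := List.eq_nil_of_length_eq_zero (by omega)
    rcases hinv.2.2 x hx with hg | hn
    · exact hinv.1 x hg
    · rw [hnil] at hn; simp at hn
  · intro h
    have hnil : (pvLoopA N0.length G0 N0).2 = [] := by
      rw [List.eq_nil_iff_forall_not_mem]
      intro p hp
      have hps : p ∈ side := (hinv.2.1 p hp).1
      exact pvFixA hinv hfix p (h p hps) hp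
    simp [hnil]

-- ---------- side B ----------

def pvInvB (side centre pending queue : List Int) : Prop :=
  pending.Nodup ∧
  (∀ p ∈ pending, p ∈ side ∧ p ∉ centre) ∧
  (∀ x ∈ side, x ∉ pending → pvReach side centre x) ∧
  queue.Nodup ∧
  (∀ q ∈ queue, q ∉ pending ∧ pvReach side centre q) ∧
  (∀ x ∈ side, x ∉ pending → x ∉ queue → (x + 1) ∉ pending ∧ (x - 1) ∉ pending)

theorem pvDiscard_length {l : List Int} {x : Int} (hn : l.Nodup) (hx : x ∈ l) :
    (PySem.Set.discard l x).length + 1 = l.length := by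
  induction l with
  | nil => simp at hx
  | cons a rest ih =>
    by_cases hax : a = x
    · subst hax
      have hnot : a ∉ rest := (List.nodup_cons.mp hn).1
      have hd : PySem.Set.discard (a :: rest) a = rest := by
        unfold PySem.Set.discard
        rw [List.filter_cons_of_neg (by simp)]
        refine List.filter_eq_self.mpr (fun y hy => ?_)
        simp only [Bool.not_eq_true', beq_eq_false_iff_ne, ne_eq]
        rintro rfl; exact hnot hy
      rw [hd]; simp
    · have hx' : x ∈ rest := by
        rcases List.mem_cons.mp hx with h | h
        · exact absurd h.symm hax
        · exact h
      have hd : PySem.Set.discard (a :: rest) x = a :: PySem.Set.discard rest x := by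
        unfold PySem.Set.discard
        rw [List.filter_cons_of_pos (by simp [hax])]
      rw [hd, List.length_cons]
      have := ih (List.nodup_cons.mp hn).2 hx'
      simp only [List.length_cons]
      omega

def pvMidB (side centre : List Int) (x : Int) (P Q : List Int) : Prop :=
  P.Nodup ∧
  (∀ p ∈ P, p ∈ side ∧ p ∉ centre) ∧
  (∀ x' ∈ side, x' ∉ P → pvReach side centre x') ∧
  Q.Nodup ∧
  (∀ q ∈ Q, q ∉ P ∧ pvReach side centre q) ∧
  x ∉ Q ∧ pvReach side centre x ∧ x ∉ P ∧
  (∀ x' ∈ side, x' ∉ P → x' ∉ Q → x' ≠ x → (x' + 1) ∉ P ∧ (x' - 1) ∉ P)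

theorem pvMid_transfer {side centre : List Int} {x y : Int} {P Q : List Int}
    (hm : pvMidB side centre x P Q) (hadj : y = x + 1 ∨ y = x - 1) (hyP : y ∈ P) :
    pvMidB side centre x (PySem.Set.discard P y) (Q ++ [y]) := by
  obtain ⟨h1, h2, h3, h4, h5, h6, h7, h8, h9⟩ := hm
  have hyne : y ≠ x := by rcases hadj with rfl | rfl <;> omega
  have hys : y ∈ side := (h2 y hyP).1
  have hyR : pvReach side centre y := by
    refine pvReach.step y x h7 hys ?_
    rcases hadj with rfl | rfl
    · exact Or.inl rfl
    · exact Or.inr rfl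
  refine ⟨PySem.Set.nodup_discard _ _ h1, ?_, ?_, ?_, ?_, ?_, h7, ?_, ?_⟩
  · intro p hp; exact h2 p ((PySem.Set.mem_discard ..).mp hp).1
  · intro x' hx' hnp
    by_cases hP : x' ∈ P
    · have hxy : x' = y := by
        by_contra hne
        exact hnp ((PySem.Set.mem_discard ..).mpr ⟨hP, hne⟩)
      subst hxy; exact hyR
    · exact h3 x' hx' hP
  · have hyQ : y ∉ Q := fun hqq => (h5 y hqq).1 hyP
    rw [List.nodup_append]
    refine ⟨h4, by simp, ?_⟩
    intro a ha b hb
    rw [List.mem_singleton] at hb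
    subst hb
    exact fun he => hyQ (he ▸ ha)
  · intro q hq
    rcases List.mem_append.mp hq with hq' | hq'
    · have hh := h5 q hq'
      exact ⟨fun hc => hh.1 ((PySem.Set.mem_discard ..).mp hc).1, hh.2⟩
    · rcases List.mem_singleton.mp hq' with rfl
      exact ⟨fun hc => (((PySem.Set.mem_discard ..).mp hc).2) rfl, hyR⟩
  · intro hc
    rcases List.mem_append.mp hc with hc' | hc'
    · exact h6 hc'
    · exact hyne (List.mem_singleton.mp hc').symm
  · exact fun hc => h8 ((PySem.Set.mem_discard ..).mp hc).1
  · intro x' hx' hnp hnq hne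
    by_cases hP : x' ∈ P
    · have hxy : x' = y := by
        by_contra hne2
        exact hnp ((PySem.Set.mem_discard ..).mpr ⟨hP, hne2⟩)
      exact absurd (List.mem_append.mpr (Or.inr (by simp [hxy]))) hnq
    · have hh := h9 x' hx' hP (fun hqq => hnq (List.mem_append.mpr (Or.inl hqq))) hne
      exact ⟨fun hc => hh.1 ((PySem.Set.mem_discard ..).mp hc).1,
             fun hc => hh.2 ((PySem.Set.mem_discard ..).mp hc).1⟩

theorem pvMid_end {side centre : List Int} {x : Int} {P Q : List Int}
    (hm : pvMidB side centre x P Q) (h1 : (x + 1) ∉ P) (h2 : (x - 1) ∉ P) :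
    pvInvB side centre P Q := by
  obtain ⟨hA, hB, hC, hD, hE, _, _, _, hI⟩ := hm
  refine ⟨hA, hB, hC, hD, hE, ?_⟩
  intro x' hx' hnp hnq
  by_cases hne : x' = x
  · subst hne; exact ⟨h1, h2⟩
  · exact hI x' hx' hnp hnq hne

theorem pvEndB {side centre P : List Int} (hinv : pvInvB side centre P []) :
    (∀ p ∈ P, p ∈ side) ∧ (∀ x ∈ side, x ∉ P → pvReach side centre x) ∧
    (∀ x, pvReach side centre x → x ∉ P) := by
  obtain ⟨_, h2, h3, _, _, h6⟩ := hinv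
  refine ⟨fun p hp => (h2 p hp).1, h3, ?_⟩
  intro x hr
  induction hr with
  | base x hs hc => exact fun hx => (h2 x hx).2 hc
  | step x y hy hs hadj ihy =>
    intro hx
    have hys : y ∈ side := pvReach_mem hy
    have hh := h6 y hys ihy (by simp)
    rcases hadj with rfl | rfl
    · exact hh.1 hx
    · exact hh.2 hx

theorem pvLoopB_spec {side centre : List Int} : ∀ (f : Nat) (pending queue : List Int),
    queue.length + 2 * pending.length ≤ f →
    pvInvB side centre pending queue →
    (∀ p ∈ pvLoopB f pending queue, p ∈ side) ∧
    (∀ x ∈ side, x ∉ pvLoopB f pending queue → pvReach side centre x) ∧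
    (∀ x, pvReach side centre x → x ∉ pvLoopB f pending queue) := by
  intro f
  induction f with
  | zero =>
    intro pending queue hf hinv
    have hq : queue = [] := List.eq_nil_of_length_eq_zero (by omega)
    subst hq
    simpa [pvLoopB] using pvEndB hinv
  | succ f ih =>
    intro pending queue hf hinv
    cases hlast : queue.getLast? with
    | none =>
      have hq : queue = [] := List.getLast?_eq_none_iff.mp hlast
      subst hq
      simpa [pvLoopB] using pvEndB hinv
    | some x =>
      have hne : queue ≠ [] := by rintro rfl; simp at hlast
      have hx : queue.getLast hne = x := by
        have := List.getLast?_eq_some_getLast (l := queue) hne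
        rw [this] at hlast
        exact Option.some_injective _ hlast
      have hq : queue.dropLast ++ [x] = queue := by
        rw [← hx]; exact List.dropLast_append_getLast hne
      obtain ⟨hN, hPm, hRe, hQn, hQm, hProc⟩ := hinv
      have hQn' : queue.dropLast.Nodup ∧ x ∉ queue.dropLast := by
        rw [← hq] at hQn
        simp [List.nodup_append] at hQn
        exact ⟨hQn.1, fun hc => hQn.2 x hc rfl⟩
      have hxq : x ∈ queue := by rw [← hq]; simp
      have hmid0 : pvMidB side centre x pending queue.dropLast := by
        refine ⟨hN, hPm, hRe, hQn'.1, ?_, hQn'.2, (hQm x hxq).2, (hQm x hxq).1, ?_⟩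
        · intro q hqq
          exact hQm q (by rw [← hq]; exact List.mem_append.mpr (Or.inl hqq))
        · intro x' hx' hnp hnq0 hnex
          refine hProc x' hx' hnp ?_
          rw [← hq]
          simp [hnq0, hnex]
      have hlen : queue.length = queue.dropLast.length + 1 := by
        rw [← hq]; simp
      simp only [pvLoopB, hlast]
      by_cases hb1 : (x + 1) ∈ pending
      · have hmid1 := pvMid_transfer hmid0 (Or.inl rfl) hb1
        have hl1 : (PySem.Set.discard pending (x + 1)).length + 1 = pending.length :=
          pvDiscard_length hN hb1
        have hf1 : (x + 1) ∉ PySem.Set.discard pending (x + 1) :=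
          fun hc => ((PySem.Set.mem_discard ..).mp hc).2 rfl
        by_cases hb2 : (x - 1) ∈ PySem.Set.discard pending (x + 1)
        · have hmid2 := pvMid_transfer hmid1 (Or.inr rfl) hb2
          have hl2 : (PySem.Set.discard (PySem.Set.discard pending (x + 1)) (x - 1)).length + 1
              = (PySem.Set.discard pending (x + 1)).length :=
            pvDiscard_length (PySem.Set.nodup_discard _ _ hN) hb2
          have hf2 : (x - 1) ∉ PySem.Set.discard (PySem.Set.discard pending (x + 1)) (x - 1) :=
            fun hc => ((PySem.Set.mem_discard ..).mp hc).2 rfl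
          have hf1' : (x + 1) ∉ PySem.Set.discard (PySem.Set.discard pending (x + 1)) (x - 1) :=
            fun hc => hf1 ((PySem.Set.mem_discard ..).mp hc).1
          simp only [if_pos hb1, if_pos hb2]
          exact ih _ _ (by simp; omega) (pvMid_end hmid2 hf1' hf2)
        · simp only [if_pos hb1, if_neg hb2]
          exact ih _ _ (by simp; omega) (pvMid_end hmid1 hf1 hb2)
      · have hf1 : (x + 1) ∉ pending := hb1
        by_cases hb2 : (x - 1) ∈ pending
        · have hmid2 := pvMid_transfer hmid0 (Or.inr rfl) hb2
          have hl2 : (PySem.Set.discard pending (x - 1)).length + 1 = pending.length :=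
            pvDiscard_length hN hb2
          have hf2 : (x - 1) ∉ PySem.Set.discard pending (x - 1) :=
            fun hc => ((PySem.Set.mem_discard ..).mp hc).2 rfl
          have hf1' : (x + 1) ∉ PySem.Set.discard pending (x - 1) :=
            fun hc => hf1 ((PySem.Set.mem_discard ..).mp hc).1
          simp only [if_neg hb1, if_pos hb2]
          exact ih _ _ (by simp; omega) (pvMid_end hmid2 hf1' hf2)
        · simp only [if_neg hb1, if_neg hb2]
          exact ih _ _ (by simp; omega) (pvMid_end hmid0 hf1 hb2)

theorem pvB_iff (side centre : List Int) :
    sideCheck_alt side centre = true ↔ ∀ x ∈ side, pvReach side centre x := by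
  unfold sideCheck_alt
  set P0 := PySem.Set.diff (PySem.Set.ofList side) (PySem.Set.ofList centre) with hP0
  set Q0 := PySem.Set.inter (PySem.Set.ofList side) (PySem.Set.ofList centre) with hQ0
  have hPmem : ∀ p, p ∈ P0 ↔ p ∈ side ∧ p ∉ centre := by
    intro p
    rw [hP0, PySem.Set.mem_diff, PySem.Set.mem_ofList, PySem.Set.mem_ofList]
  have hQmem : ∀ q, q ∈ Q0 ↔ q ∈ side ∧ q ∈ centre := by
    intro q
    rw [hQ0, PySem.Set.mem_inter, PySem.Set.mem_ofList, PySem.Set.mem_ofList]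
  have hinv : pvInvB side centre P0 Q0 := by
    refine ⟨PySem.Set.nodup_diff _ _ (PySem.Set.nodup_ofList side),
            fun p hp => (hPmem p).mp hp, ?_,
            PySem.Set.nodup_inter _ _ (PySem.Set.nodup_ofList side), ?_, ?_⟩
    · intro x hx hnp
      have hc : x ∈ centre := by
        by_contra hc
        exact hnp ((hPmem x).mpr ⟨hx, hc⟩)
      exact pvReach.base x hx hc
    · intro q hq
      have hh := (hQmem q).mp hq
      exact ⟨fun hc => ((hPmem q).mp hc).2 hh.2, pvReach.base q hh.1 hh.2⟩
    · intro x hx hnp hnq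
      have hc : x ∈ centre := by
        by_contra hc
        exact hnp ((hPmem x).mpr ⟨hx, hc⟩)
      exact absurd ((hQmem x).mpr ⟨hx, hc⟩) hnq
  have hspec := pvLoopB_spec (side := side) (centre := centre)
      (Q0.length + 2 * P0.length) P0 Q0 (le_refl _) hinv
  rw [List.isEmpty_iff]
  constructor
  · intro hnil x hx
    exact hspec.2.1 x hx (by rw [hnil]; simp)
  · intro h
    rw [List.eq_nil_iff_forall_not_mem]
    intro p hp
    exact hspec.2.2 p (h p (hspec.1 p hp)) hp

-- ===== VERDICT (by name: the statement is the Claim_ definition above) =====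
theorem sideCheck_spec : Claim_equal_sideCheck := by
  intro side centre _
  unfold Spec_sideCheck
  rw [Bool.eq_iff_iff, pvA_iff, pvB_iff]
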